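-- pv_equiv track=rewrite | github.com/Aqusiz/ps_practice | 15685.py | make_dragon_curve
-- ===== SOURCE A (Python) =====
-- dxdy = ((1, 0), (0, -1), (-1, 0), (0, 1))
--
-- def make_dragon_curve(x, y, d, g):
--     if g == 0:
--         dx, dy = dxdy[d]
--         return [(x, y), (x + dx, y + dy)]
--
--     coord_list = make_dragon_curve(x, y, d, g-1)
--
--     d_list = []
--     for i in range(len(coord_list) - 1):
--         x1, y1 = coord_list[i]
--         x2, y2 = coord_list[i + 1]
--         dx, dy = x2 - x1, y2 - y1
--         d_list.append((dxdy.index((dx, dy)) + 1) % 4)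
--     d_list.reverse()
--     x, y = coord_list[-1]
--     for direction in d_list:
--         dx, dy = dxdy[direction]
--         x, y = x + dx, y + dy
--         coord_list.append((x, y))
--
--     return coord_list
-- ===== SOURCE B (Python) =====
-- dxdy = ((1, 0), (0, -1), (-1, 0), (0, 1))
--
-- def make_dragon_curve(x, y, d, g):
--     # Build the direction-index sequence first, convert to coordinates once.
--     dirs = [d % 4]
--     for _ in range(g):
--         dirs = dirs + [(t + 1) % 4 for t in reversed(dirs)]
--     coords = [(x, y)]
--     for t in dirs:
--         dx, dy = dxdy[t]
--         x, y = x + dx, y + dy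
--         coords.append((x, y))
--     return coords
-- ===== Notes on version B (the rewrite author's own statement) =====
-- stated objective: simpler
-- what changed: B replaces the recursion that repeatedly reconstructs directions from coordinate differences (dxdy.index) by an iterative build of the direction-index list (dirs += [(t+1)%4 for t in reversed(dirs)]) followed by a single final walk converting directions to coordinates once.
import Mathlib
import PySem

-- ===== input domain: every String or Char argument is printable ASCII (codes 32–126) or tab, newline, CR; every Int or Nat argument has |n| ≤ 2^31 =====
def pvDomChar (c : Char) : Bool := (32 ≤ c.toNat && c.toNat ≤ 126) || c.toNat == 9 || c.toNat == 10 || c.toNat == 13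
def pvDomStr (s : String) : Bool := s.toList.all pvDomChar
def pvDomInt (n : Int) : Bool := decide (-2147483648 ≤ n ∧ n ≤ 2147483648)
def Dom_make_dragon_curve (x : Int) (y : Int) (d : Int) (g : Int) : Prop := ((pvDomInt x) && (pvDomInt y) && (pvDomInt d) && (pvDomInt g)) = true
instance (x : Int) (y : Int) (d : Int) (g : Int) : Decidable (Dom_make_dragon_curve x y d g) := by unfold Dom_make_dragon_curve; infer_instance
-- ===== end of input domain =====

-- B builds the direction-index list iteratively and converts to coordinates once at the end,
-- instead of A's recursion that re-derives directions from coordinate differences each generation (objective: simpler).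

-- ===== PORT A =====
-- dxdy = ((1, 0), (0, -1), (-1, 0), (0, 1))
def dxdyL : List (Int × Int) := [(1, 0), (0, -1), (-1, 0), (0, 1)]

-- recursive body of A on the generation count; Pre_ guarantees 0 ≤ g and that dxdy[d] /
-- dxdy.index(...) are in range, so the .getD defaults are never taken on admitted inputs.
def mdcA (x : Int) (y : Int) (d : Int) : Nat → List (Int × Int)
  | 0 =>
      let p := (PySem.List.pyGet? dxdyL d).getD (0, 0)
      [(x, y), (x + p.1, y + p.2)]
  | n + 1 =>
      let cl := mdcA x y d n
      let d_list := (PySem.List.pyRange 0 ((cl.length : Int) - 1) 1).foldl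
        (fun acc i =>
          let p1 := (PySem.List.pyGet? cl i).getD (0, 0)
          let p2 := (PySem.List.pyGet? cl (i + 1)).getD (0, 0)
          acc ++ [PySem.Int.mod (((PySem.List.index? dxdyL (p2.1 - p1.1, p2.2 - p1.2)).getD 0 : Int) + 1) 4]) []
      let d_list := d_list.reverse
      let last := (PySem.List.pyGet? cl (-1)).getD (0, 0)
      (d_list.foldl
        (fun (st : List (Int × Int) × Int × Int) dir =>
          let p := (PySem.List.pyGet? dxdyL dir).getD (0, 0)
          (st.1 ++ [(st.2.1 + p.1, st.2.2 + p.2)], st.2.1 + p.1, st.2.2 + p.2))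
        (cl, last.1, last.2)).1

-- Pre_ requires 0 ≤ g (Python A recurses forever on g < 0), so g.toNat is exact.
def make_dragon_curve (x : Int) (y : Int) (d : Int) (g : Int) : List (Int × Int) :=
  mdcA x y d g.toNat

-- ===== PORT B =====
def make_dragon_curve_alt (x : Int) (y : Int) (d : Int) (g : Int) : List (Int × Int) :=
  let dirs := (PySem.List.pyRange 0 g 1).foldl
      (fun ds _ => ds ++ ds.reverse.map (fun t => PySem.Int.mod (t + 1) 4)) [PySem.Int.mod d 4]
  (dirs.foldl
    (fun (st : List (Int × Int) × Int × Int) t =>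
      let p := (PySem.List.pyGet? dxdyL t).getD (0, 0)
      (st.1 ++ [(st.2.1 + p.1, st.2.2 + p.2)], st.2.1 + p.1, st.2.2 + p.2))
    ([(x, y)], x, y)).1

-- ===== PRECONDITION & SPEC =====
-- A returns normally exactly when g ≥ 0 (else RecursionError) and d indexes the 4-tuple dxdy
-- (else IndexError); Pre_ excludes exactly those crashes.
def Pre_make_dragon_curve (x : Int) (y : Int) (d : Int) (g : Int) : Prop :=
  0 ≤ g ∧ -4 ≤ d ∧ d < 4
instance (x : Int) (y : Int) (d : Int) (g : Int) : Decidable (Pre_make_dragon_curve x y d g) := by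
  unfold Pre_make_dragon_curve; infer_instance

def pvWitness_make_dragon_curve : Int × Int × Int × Int := (0, 0, 0, 2)

def Spec_make_dragon_curve (x : Int) (y : Int) (d : Int) (g : Int) (out : List (Int × Int)) : Prop := out = make_dragon_curve_alt x y d g
instance (x : Int) (y : Int) (d : Int) (g : Int) (out : List (Int × Int)) : Decidable (Spec_make_dragon_curve x y d g out) := by unfold Spec_make_dragon_curve; infer_instance

-- ===== CLAIM (what is proved, stated in full; the proofs are below) =====
def Claim_equal_make_dragon_curve : Prop := ∀ (x : Int) (y : Int) (d : Int) (g : Int), Dom_make_dragon_curve x y d g → Pre_make_dragon_curve x y d g → Spec_make_dragon_curve x y d g (make_dragon_curve x y d g)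

-- ===== LEMMAS AND PROOFS =====

-- step vector of a direction index
def stepv (t : Int) : Int × Int := (PySem.List.pyGet? dxdyL t).getD (0, 0)
-- next-generation direction
def nxt (t : Int) : Int := PySem.Int.mod (t + 1) 4

-- the direction list of generation n with seed d
def D0 (d : Int) : Nat → List Int
  | 0 => [PySem.Int.mod d 4]
  | n + 1 => D0 d n ++ (D0 d n).reverse.map nxt

-- walk p L : coordinate list starting at p following directions L
def walk : Int × Int → List Int → List (Int × Int)
  | p, [] => [p]
  | p, t :: ts => p :: walk (p.1 + (stepv t).1, p.2 + (stepv t).2) ts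

-- endpoint of the walk
def wEnd : Int × Int → List Int → Int × Int
  | p, [] => p
  | p, t :: ts => wEnd (p.1 + (stepv t).1, p.2 + (stepv t).2) ts

theorem walk_cons_tail (p : Int × Int) (L : List Int) : walk p L = p :: (walk p L).tail := by
  cases L <;> simp [walk]

theorem walk_length (p : Int × Int) (L : List Int) : (walk p L).length = L.length + 1 := by
  induction L generalizing p with
  | nil => simp [walk]
  | cons t ts ih => simp [walk, ih]

theorem walk_getLast (p : Int × Int) (L : List Int) :
    (walk p L).getLast? = some (wEnd p L) := by
  induction L generalizing p with
  | nil => simp [walk, wEnd]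
  | cons t ts ih =>
      rw [walk, wEnd, List.getLast?_cons, ih]
      simp [Option.getD]

theorem walk_append (p : Int × Int) (L1 L2 : List Int) :
    walk p (L1 ++ L2) = walk p L1 ++ (walk (wEnd p L1) L2).tail := by
  induction L1 generalizing p with
  | nil =>
      simp only [List.nil_append, walk, wEnd]
      rw [walk_cons_tail p L2]
      simp
  | cons t ts ih => simp [walk, wEnd, ih]

-- the coordinate-appending loop of both ports, related to walk
theorem walk_fold (L : List Int) (acc : List (Int × Int)) (a b : Int) :
    (L.foldl
      (fun (st : List (Int × Int) × Int × Int) t =>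
        let p := (PySem.List.pyGet? dxdyL t).getD (0, 0)
        (st.1 ++ [(st.2.1 + p.1, st.2.2 + p.2)], st.2.1 + p.1, st.2.2 + p.2))
      (acc, a, b))
    = (acc ++ (walk (a, b) L).tail, (wEnd (a, b) L).1, (wEnd (a, b) L).2) := by
  induction L generalizing acc a b with
  | nil => simp [walk, wEnd]
  | cons t ts ih =>
      simp only [List.foldl_cons, walk, wEnd]
      rw [ih]
      simp only [stepv, List.tail_cons, List.append_assoc, List.singleton_append]
      rw [← walk_cons_tail]

theorem D0_bounds (d : Int) (n : Nat) : ∀ t ∈ D0 d n, 0 ≤ t ∧ t < 4 := by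
  induction n with
  | zero =>
      intro t ht
      simp only [D0, List.mem_singleton] at ht
      subst ht
      exact ⟨PySem.Int.mod_nonneg _ (by norm_num), PySem.Int.mod_lt _ (by norm_num)⟩
  | succ n ih =>
      intro t ht
      simp only [D0, List.mem_append, List.mem_map, List.mem_reverse] at ht
      rcases ht with h | ⟨s, _, rfl⟩
      · exact ih t h
      · exact ⟨PySem.Int.mod_nonneg _ (by norm_num), PySem.Int.mod_lt _ (by norm_num)⟩

-- direction recovery: for an in-range direction, dxdy.index(dxdy[t]) = t
theorem index_stepv (t : Int) (h0 : 0 ≤ t) (h4 : t < 4) :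
    ((PySem.List.index? dxdyL (stepv t)).getD 0 : Int) = t := by
  interval_cases t <;> decide

-- the head of a walk is its start point
theorem walk_get_zero (p : Int × Int) (L : List Int) :
    (PySem.List.pyGet? (walk p L) 0).getD (0, 0) = p := by
  rw [walk_cons_tail]
  simp

-- the extraction loop of A recovers the direction list (mapped by nxt)
theorem extract (L : List Int) (p : Int × Int) (hb : ∀ t ∈ L, 0 ≤ t ∧ t < 4) :
    (List.range L.length).map (fun (k : Nat) =>
      let p1 := (PySem.List.pyGet? (walk p L) ((k : Nat) : Int)).getD (0, 0)
      let p2 := (PySem.List.pyGet? (walk p L) (((k : Nat) : Int) + 1)).getD (0, 0)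
      PySem.Int.mod (((PySem.List.index? dxdyL (p2.1 - p1.1, p2.2 - p1.2)).getD 0 : Int) + 1) 4)
    = L.map nxt := by
  induction L generalizing p with
  | nil => simp
  | cons t ts ih =>
      have hbt := hb t (List.mem_cons_self ..)
      have hbts : ∀ s ∈ ts, 0 ≤ s ∧ s < 4 := fun s hs => hb s (List.mem_cons_of_mem _ hs)
      rw [List.length_cons, List.range_succ_eq_map, List.map_cons, List.map_map]
      congr 1
      · -- index 0: the first difference is stepv t
        show PySem.Int.mod _ 4 = nxt t
        have h0 : (PySem.List.pyGet? (walk p (t :: ts)) 0).getD (0, 0) = p := walk_get_zero _ _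
        have h1 : (PySem.List.pyGet? (walk p (t :: ts)) ((0 : Int) + 1)).getD (0, 0)
            = (p.1 + (stepv t).1, p.2 + (stepv t).2) := by
          rw [walk]
          have : ((0 : Int) + 1) = ((0 : Nat) : Int) + 1 := by norm_num
          rw [this, PySem.List.pyGet?_cons_succ]
          simpa using walk_get_zero (p.1 + (stepv t).1, p.2 + (stepv t).2) ts
        simp only [Nat.cast_zero, h0, h1]
        have : ((p.1 + (stepv t).1) - p.1, (p.2 + (stepv t).2) - p.2) = stepv t := by
          cases hst : stepv t; simp
        rw [this, index_stepv t hbt.1 hbt.2]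
        rfl
      · -- indices k+1: shift into the tail walk
        rw [← ih (p.1 + (stepv t).1, p.2 + (stepv t).2) hbts]
        apply List.map_congr_left
        intro k _
        simp only [Function.comp_apply]
        have hc1 : ((k.succ : Nat) : Int) = ((k : Nat) : Int) + 1 := by push_cast; ring
        have e1 : PySem.List.pyGet? (walk p (t :: ts)) ((k.succ : Nat) : Int)
            = PySem.List.pyGet? (walk (p.1 + (stepv t).1, p.2 + (stepv t).2) ts) (k : Int) := by
          rw [hc1, walk, PySem.List.pyGet?_cons_succ]
        have e2 : PySem.List.pyGet? (walk p (t :: ts)) (((k.succ : Nat) : Int) + 1)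
            = PySem.List.pyGet? (walk (p.1 + (stepv t).1, p.2 + (stepv t).2) ts) ((k : Int) + 1) := by
          have : ((k.succ : Nat) : Int) + 1 = (((k + 1 : Nat)) : Int) + 1 := by push_cast; ring
          rw [this, walk, PySem.List.pyGet?_cons_succ]
          congr 1
        simp only [e1, e2]

-- A computes the walk of the direction list
theorem mdcA_eq_walk (x y d : Int) (hd0 : -4 ≤ d) (hd4 : d < 4) (n : Nat) :
    mdcA x y d n = walk (x, y) (D0 d n) := by
  induction n with
  | zero =>
      show _ = walk (x, y) [PySem.Int.mod d 4]
      simp only [mdcA, walk]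
      have : (PySem.List.pyGet? dxdyL d).getD (0, 0) = stepv (PySem.Int.mod d 4) := by
        interval_cases d <;> decide
      rw [this]
  | succ n ih =>
      rw [mdcA, ih]
      simp only []
      rw [PySem.List.foldl_append_singleton_eq_map, List.nil_append]
      rw [PySem.List.pyRange_one]
      rw [List.map_map]
      have hlen : (((walk (x, y) (D0 d n)).length : Int) - 1 - 0).toNat = (D0 d n).length := by
        rw [walk_length]; omega
      rw [hlen]
      have hmap : (List.range (D0 d n).length).map
          ((fun i =>
            let p1 := (PySem.List.pyGet? (walk (x, y) (D0 d n)) i).getD (0, 0)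
            let p2 := (PySem.List.pyGet? (walk (x, y) (D0 d n)) (i + 1)).getD (0, 0)
            PySem.Int.mod (((PySem.List.index? dxdyL (p2.1 - p1.1, p2.2 - p1.2)).getD 0 : Int) + 1) 4)
            ∘ (fun k : Nat => (0 : Int) + (k : Int)))
          = (D0 d n).map nxt := by
        rw [← extract (D0 d n) (x, y) (D0_bounds d n)]
        apply List.map_congr_left
        intro k _
        simp
      rw [hmap]
      have hlast : (PySem.List.pyGet? (walk (x, y) (D0 d n)) (-1)).getD (0, 0)
          = wEnd (x, y) (D0 d n) := by
        rw [PySem.List.pyGet?_neg_one, walk_getLast]; rfl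
      rw [hlast]
      rw [walk_fold]
      show walk (x, y) (D0 d n) ++ _ = _
      rw [← List.map_reverse, ← walk_append]
      rfl

-- B's generation loop builds D0
theorem altDirs_eq_D0 (d g : Int) (hg : 0 ≤ g) :
    (PySem.List.pyRange 0 g 1).foldl
      (fun ds _ => ds ++ ds.reverse.map (fun t => PySem.Int.mod (t + 1) 4)) [PySem.Int.mod d 4]
    = D0 d g.toNat := by
  rw [PySem.List.pyRange_one, List.foldl_map]
  have : (g - 0).toNat = g.toNat := by omega
  rw [this]
  induction g.toNat with
  | zero => simp [D0]
  | succ n ih =>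
      rw [List.range_succ, List.foldl_append, ih]
      simp [D0, nxt]

-- ===== VERDICT (by name: the statement is the Claim_ definition above) =====
theorem make_dragon_curve_spec : Claim_equal_make_dragon_curve := by
  intro x y d g _ hpre
  obtain ⟨hg, hd0, hd4⟩ := hpre
  show make_dragon_curve x y d g = make_dragon_curve_alt x y d g
  rw [make_dragon_curve, make_dragon_curve_alt]
  simp only []
  rw [altDirs_eq_D0 d g hg, mdcA_eq_walk x y d hd0 hd4 g.toNat, walk_fold]
  show _ = [(x, y)] ++ (walk (x, y) (D0 d g.toNat)).tail
  rw [List.singleton_append, ← walk_cons_tail]
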